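-- pv_equiv track=rewrite | github.com/fern35/Internship_VinciEnergies | Call0502/modules/cleaner.py | replace_digits_by_zero
-- ===== SOURCE A (Python) =====
-- import string
--
-- def replace_digits_by_zero(data):
--     digits = string.digits[1:]
--     words = data.split()
--     new_data = []
--     for word in words:
--         for digit in digits:
--             word = word.replace(str(digit), str(0))
--         new_data.append(word)
--
--     new_data = ' '.join(new_data)
--
--     return new_data
-- ===== SOURCE B (Python) =====
-- def replace_digits_by_zero(data):
--     return ' '.join(
--         ''.join('0' if c in '123456789' else c for c in word)
--         for word in data.split()
--     )
-- ===== Notes on version B (the rewrite author's own statement) =====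
-- stated objective: simpler
-- what changed: A runs nine successive whole-word str.replace scans per word; B makes a single per-character pass over each word, substituting a zero for each nonzero digit and keeping every other character (split/join whitespace normalization kept).
import Mathlib
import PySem

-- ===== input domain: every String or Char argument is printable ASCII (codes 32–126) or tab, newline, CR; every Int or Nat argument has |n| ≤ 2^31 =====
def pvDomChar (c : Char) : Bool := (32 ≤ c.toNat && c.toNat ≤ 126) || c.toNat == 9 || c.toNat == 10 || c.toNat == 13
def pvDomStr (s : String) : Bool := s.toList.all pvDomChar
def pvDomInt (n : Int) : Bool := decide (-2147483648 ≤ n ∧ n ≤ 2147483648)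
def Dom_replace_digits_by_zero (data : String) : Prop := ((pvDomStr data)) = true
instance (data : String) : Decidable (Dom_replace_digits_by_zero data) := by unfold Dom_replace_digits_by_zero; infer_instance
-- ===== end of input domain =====

-- B replaces A's nine successive whole-word .replace scans by one per-character pass (simpler: one scan per word).

-- ===== PORT A =====
def replace_digits_by_zero (data : String) : String :=
  let digits := PySem.Str.slice "0123456789" (some 1) none
  let words := PySem.Str.split₀ data
  let new_data := words.foldl (fun acc word =>
    acc ++ [digits.toList.foldl (fun w digit =>
      PySem.Str.replace w (String.ofList [digit]) (PySem.Int.toStr 0)) word]) ([] : List String)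
  PySem.Str.join " " new_data

-- ===== PORT B =====
def replace_digits_by_zero_alt (data : String) : String :=
  PySem.Str.join " " ((PySem.Str.split₀ data).map (fun word =>
    PySem.Str.join "" (word.toList.map (fun c =>
      if c ∈ "123456789".toList then "0" else String.ofList [c]))))

-- ===== PRECONDITION & SPEC =====
def Spec_replace_digits_by_zero (data : String) (out : String) : Prop := out = replace_digits_by_zero_alt data
instance (data : String) (out : String) : Decidable (Spec_replace_digits_by_zero data out) := by unfold Spec_replace_digits_by_zero; infer_instance

-- ===== CLAIM (what is proved, stated in full; the proofs are below) =====
def Claim_equal_replace_digits_by_zero : Prop := ∀ (data : String), Dom_replace_digits_by_zero data → Spec_replace_digits_by_zero data (replace_digits_by_zero data)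

-- ===== LEMMAS AND PROOFS =====

-- the single-character substitution A's word.replace(d, '0') performs (proof-side name)
def pvSub (d : Char) : Char → Char := fun c => if c = d then '0' else c

-- Chars.replace with a one-character pattern is a per-character substitution.
theorem pv_go_single (d e : Char) (l acc : List Char) :
    PySem.Chars.replace.go [d] [e] l.length l acc
      = acc.reverse ++ l.map (fun c => if c = d then e else c) := by
  induction l generalizing acc with
  | nil => simp [PySem.Chars.replace.go]
  | cons c t ih =>
    simp only [List.length_cons, PySem.Chars.replace.go]
    by_cases h : c = d
    · subst h; simp [List.isPrefixOf, ih]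
    · simp [List.isPrefixOf, h, ih, List.reverse_cons]
      exact fun hh => absurd hh.symm h

theorem pv_replace_single (d e : Char) (cs : List Char) :
    PySem.Chars.replace cs [d] [e] = cs.map (fun c => if c = d then e else c) := by
  simp [PySem.Chars.replace, pv_go_single]

-- one .replace step of A, on the Str level
theorem pv_hstep (v : String) (d : Char) :
    PySem.Str.replace v (String.ofList [d]) (String.ofList ['0'])
      = String.ofList (v.toList.map (pvSub d)) := by
  simp only [PySem.Str.replace, String.toList_ofList, pv_replace_single]
  rfl

-- the nine successive substitutions collapse to B's single conditional, pointwise …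
theorem pv_char (c : Char) :
    pvSub '9' (pvSub '8' (pvSub '7' (pvSub '6' (pvSub '5' (pvSub '4' (pvSub '3' (pvSub '2' (pvSub '1' c))))))))
      = if c ∈ (['1','2','3','4','5','6','7','8','9'] : List Char) then '0' else c := by
  by_cases h : c ∈ (['1','2','3','4','5','6','7','8','9'] : List Char)
  · rw [if_pos h]
    have h' : c = '1' ∨ c = '2' ∨ c = '3' ∨ c = '4' ∨ c = '5' ∨ c = '6' ∨ c = '7' ∨ c = '8' ∨ c = '9' := by
      simpa using h
    rcases h' with rfl | rfl | rfl | rfl | rfl | rfl | rfl | rfl | rfl <;> rfl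
  · rw [if_neg h]
    simp only [List.mem_cons, not_or] at h
    obtain ⟨h1, h2, h3, h4, h5, h6, h7, h8, h9, -⟩ := h
    simp [pvSub, h1, h2, h3, h4, h5, h6, h7, h8, h9]

-- … and hence on whole character lists.
theorem pv_chain_list (l : List Char) :
    List.map (pvSub '9') (List.map (pvSub '8') (List.map (pvSub '7') (List.map (pvSub '6')
      (List.map (pvSub '5') (List.map (pvSub '4') (List.map (pvSub '3') (List.map (pvSub '2')
        (List.map (pvSub '1') l))))))))
      = List.map (fun c => if c ∈ (['1','2','3','4','5','6','7','8','9'] : List Char) then '0' else c) l := by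
  induction l with
  | nil => rfl
  | cons c t ih =>
    simp only [List.map_cons]
    rw [ih, pv_char]

-- B's per-word pass, as a plain character map.
theorem pv_alt_word (cs : List Char) :
    PySem.Str.join "" (cs.map (fun c =>
        if c ∈ "123456789".toList then "0" else String.ofList [c]))
      = String.ofList (cs.map (fun c =>
        if c ∈ "123456789".toList then '0' else c)) := by
  have hmap : (cs.map (fun c =>
      if c ∈ "123456789".toList then ("0" : String) else String.ofList [c]))
      = ((cs.map (fun c => if c ∈ "123456789".toList then '0' else c)).map
          (fun c => String.ofList [c])) := by
    simp only [List.map_map]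
    refine List.map_congr_left (fun c _ => ?_)
    by_cases h : c ∈ "123456789".toList
    · rw [Function.comp_apply, if_pos h, if_pos h]
    · rw [Function.comp_apply, if_neg h, if_neg h]
  rw [hmap]
  simp only [PySem.Str.join]
  rw [show (List.map String.toList
      ((cs.map (fun c => if c ∈ "123456789".toList then '0' else c)).map
        (fun c => String.ofList [c])))
      = ((cs.map (fun c => if c ∈ "123456789".toList then '0' else c)).map
        (fun c => [c])) by simp [List.map_map]]
  rw [show ("" : String).toList = ([] : List Char) by rfl]
  rw [PySem.Chars.join_nil_singletons]

-- One word: A's nine successive single-digit replaces equal B's single per-character pass.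
theorem pv_word_eq (w : String) :
    ("123456789".toList).foldl (fun w digit =>
        PySem.Str.replace w (String.ofList [digit]) (PySem.Int.toStr 0)) w
      = PySem.Str.join "" (w.toList.map (fun c =>
          if c ∈ "123456789".toList then "0" else String.ofList [c])) := by
  rw [pv_alt_word]
  simp only [show "123456789".toList = (['1','2','3','4','5','6','7','8','9'] : List Char) from by decide,
    show PySem.Int.toStr 0 = String.ofList ['0'] from by decide]
  simp only [List.foldl_cons, List.foldl_nil, pv_hstep, String.toList_ofList]
  exact congrArg String.ofList (pv_chain_list w.toList)

-- The append-singleton foldl in A is a map.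
theorem pv_fold_map (proc : String → String) (ws : List String) :
    ws.foldl (fun acc word => acc ++ [proc word]) ([] : List String) = ws.map proc := by
  simpa using PySem.List.foldl_append_singleton_eq_map proc ws []

-- ===== VERDICT (by name: the statement is the Claim_ definition above) =====
theorem replace_digits_by_zero_spec : Claim_equal_replace_digits_by_zero := by
  intro data _
  show replace_digits_by_zero data = replace_digits_by_zero_alt data
  simp only [replace_digits_by_zero, replace_digits_by_zero_alt,
    show PySem.Str.slice "0123456789" (some 1) none = "123456789" from by decide,
    pv_fold_map]
  refine congrArg (PySem.Str.join " ") ?_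
  exact List.map_congr_left (fun w _ => pv_word_eq w)
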